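-- pv_equiv track=rewrite | github.com/Rehan-sv/SEM1_CPS | files_imp/campus.py | unique_programs
-- ===== SOURCE A (Python) =====
-- def unique_programs(c):
--     prog_count = {}
--     for i in c:
--         for p in c[i]["programs"]:
--             prog_count[p] = prog_count.get(p, 0) + 1
--
--     result = []
--     for p in prog_count:
--         if prog_count[p] == 1:
--             result.append(p)
--     return result
-- ===== SOURCE B (Python) =====
-- def unique_programs(c):
--     seen = set()
--     result = {}
--     for campus in c.values():
--         for p in campus["programs"]:
--             if p in seen:
--                 result.pop(p, None)
--             else:
--                 seen.add(p)
--                 result[p] = True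
--     return list(result)
-- ===== Notes on version B (the rewrite author's own statement) =====
-- stated objective: alternative
-- what changed: A tallies a frequency dict over all programs and then filters its keys in a second loop; B makes a single incremental pass keeping a 'seen' set and an insertion-ordered result dict (insert on first sight, pop on second), so the answer set is maintained on the fly and no frequency tally or second loop exists.
import Mathlib
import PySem

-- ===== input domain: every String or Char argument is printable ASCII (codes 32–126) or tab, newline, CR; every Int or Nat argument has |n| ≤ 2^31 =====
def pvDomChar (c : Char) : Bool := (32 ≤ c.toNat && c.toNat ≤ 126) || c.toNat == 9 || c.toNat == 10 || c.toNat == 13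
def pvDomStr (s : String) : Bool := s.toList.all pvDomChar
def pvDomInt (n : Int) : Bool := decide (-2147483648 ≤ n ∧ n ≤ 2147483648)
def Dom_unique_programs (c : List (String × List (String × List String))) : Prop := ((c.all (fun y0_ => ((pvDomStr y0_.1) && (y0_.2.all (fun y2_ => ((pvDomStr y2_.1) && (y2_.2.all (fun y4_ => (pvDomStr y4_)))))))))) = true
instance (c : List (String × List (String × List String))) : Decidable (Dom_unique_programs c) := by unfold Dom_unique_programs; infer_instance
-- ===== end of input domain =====

-- B replaces A's count-then-filter (frequency dict, then a second loop over its keys) by a single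
-- incremental pass keeping a `seen` set and an insertion-ordered result dict; same cost, different state.

-- ===== PORT A =====
def unique_programs (c : List (String × List (String × List String))) : List String :=
  let prog_count : PySem.Dict String Int :=
    (PySem.Dict.mk c).keys.foldl
      (fun pc i =>
        (((PySem.Dict.mk (((PySem.Dict.mk c).get? i).getD [])).get? "programs").getD []).foldl
          (fun pc p => pc.insert p (pc.getD p 0 + 1)) pc)
      PySem.Dict.empty
  prog_count.keys.foldl
    (fun result p => if prog_count.getD p 0 == 1 then result ++ [p] else result) []

-- ===== PORT B =====
def unique_programs_alt (c : List (String × List (String × List String))) : List String :=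
  let st :=
    c.foldl
      (fun (st : PySem.Set String × PySem.Dict String Bool) campus =>
        (((PySem.Dict.mk campus.2).get? "programs").getD []).foldl
          (fun st p =>
            if PySem.Set.contains st.1 p then (st.1, st.2.erase p)
            else (PySem.Set.add st.1 p, st.2.insert p true))
          st)
      (PySem.Set.empty, PySem.Dict.empty)
  st.2.keys

-- ===== PRECONDITION & SPEC =====
-- Pre_ excludes campuses whose inner dict lacks a "programs" key (the Python A raises KeyError there),
-- and association lists with duplicate keys (outer or inner), which have no Python-dict counterpart.
def Pre_unique_programs (c : List (String × List (String × List String))) : Prop :=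
  (c.map Prod.fst).Nodup ∧
    ∀ i ∈ c, (i.2.map Prod.fst).Nodup ∧ "programs" ∈ i.2.map Prod.fst

instance (c : List (String × List (String × List String))) : Decidable (Pre_unique_programs c) := by
  unfold Pre_unique_programs; infer_instance

def pvWitness_unique_programs : (List (String × List (String × List String))) :=
  [("main", [("programs", ["cs", "math"])]), ("north", [("programs", ["cs"])])]

def Spec_unique_programs (c : List (String × List (String × List String))) (out : List String) : Prop := out = unique_programs_alt c
instance (c : List (String × List (String × List String))) (out : List String) : Decidable (Spec_unique_programs c out) := by unfold Spec_unique_programs; infer_instance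

-- ===== CLAIM (what is proved, stated in full; the proofs are below) =====
def Claim_equal_unique_programs : Prop := ∀ (c : List (String × List (String × List String))), Dom_unique_programs c → Pre_unique_programs c → Spec_unique_programs c (unique_programs c)

-- ===== LEMMAS AND PROOFS =====

-- the list of programs of one campus entry (the flattened iteration space of both programs)
def progsOf (i : String × List (String × List String)) : List String :=
  ((PySem.Dict.mk i.2).get? "programs").getD []

-- B's loop body, as a named function (definitionally the lambda in the port)
def bstep (st : PySem.Set String × PySem.Dict String Bool) (p : String) :
    PySem.Set String × PySem.Dict String Bool :=
  if PySem.Set.contains st.1 p then (st.1, st.2.erase p)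
  else (PySem.Set.add st.1 p, st.2.insert p true)

-- the common characterisation both programs are reduced to
def onceOf (ps : List String) : List String :=
  (PySem.Set.ofList ps).filter (fun p => ps.count p == 1)

lemma count_append_singleton (ps : List String) (p q : String) :
    (ps ++ [p]).count q = ps.count q + if p = q then 1 else 0 := by
  rcases eq_or_ne p q with h | h
  · subst h; simp [List.count_append]
  · simp [List.count_append, h]

lemma onceOf_append_mem (ps : List String) (p : String) (hp : p ∈ ps) :
    onceOf (ps ++ [p]) = (onceOf ps).filter (fun q => q != p) := by
  unfold onceOf
  rw [PySem.Set.ofList_append_singleton,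
      PySem.Set.add_of_mem (by simpa [PySem.Set.mem_ofList] using hp),
      List.filter_filter]
  apply List.filter_congr
  intro q hq
  rw [count_append_singleton]
  by_cases h : q = p
  · subst h
    have : 1 ≤ ps.count q := List.one_le_count_iff.mpr hp
    simp only [bne_self_eq_false]
    simp; omega
  · simp [Ne.symm h, h]

lemma onceOf_append_not_mem (ps : List String) (p : String) (hp : p ∉ ps) :
    onceOf (ps ++ [p]) = onceOf ps ++ [p] := by
  unfold onceOf
  rw [PySem.Set.ofList_append_singleton,
      PySem.Set.add_of_not_mem (by simpa [PySem.Set.mem_ofList] using hp),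
      List.filter_append]
  congr 1
  · apply List.filter_congr
    intro q hq
    have hq' : q ∈ ps := by simpa [PySem.Set.mem_ofList] using hq
    have hne : p ≠ q := fun h => hp (h ▸ hq')
    rw [count_append_singleton]; simp [hne]
  · simp [List.count_eq_zero_of_not_mem hp]

-- invariant of B's loop over the flattened program list
lemma bfold_char (ps : List String) :
    ps.foldl bstep (PySem.Set.empty, PySem.Dict.empty) =
      (PySem.Set.ofList ps, PySem.Dict.mk ((onceOf ps).map (fun p => (p, true)))) := by
  induction ps using List.reverseRecOn with
  | nil => rfl
  | append_singleton ps p ih =>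
    rw [List.foldl_append, ih]
    have hsub : ∀ q ∈ onceOf ps, q ∈ ps := by
      intro q hq
      simpa [PySem.Set.mem_ofList] using List.mem_of_mem_filter hq
    by_cases hp : p ∈ ps
    · have hc : PySem.Set.contains (PySem.Set.ofList ps) p = true := by
        simp [PySem.Set.mem_ofList, hp]
      simp only [List.foldl_cons, List.foldl_nil, bstep, hc, if_true]
      rw [PySem.Set.ofList_append_singleton,
          PySem.Set.add_of_mem (by simpa [PySem.Set.mem_ofList] using hp),
          onceOf_append_mem ps p hp]
      refine Prod.ext rfl ?_
      apply PySem.Dict.ext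
      show List.filter _ _ = _
      rw [List.filter_map]
      rfl
    · have hc : PySem.Set.contains (PySem.Set.ofList ps) p = false := by
        simp [PySem.Set.mem_ofList, hp]
      simp only [List.foldl_cons, List.foldl_nil, bstep, hc, Bool.false_eq_true, if_false]
      rw [PySem.Set.ofList_append_singleton,
          PySem.Set.add_of_not_mem (by simpa [PySem.Set.mem_ofList] using hp),
          onceOf_append_not_mem ps p hp]
      refine Prod.ext rfl ?_
      apply PySem.Dict.ext
      have hnc : (PySem.Dict.mk ((onceOf ps).map (fun p => (p, true)))).contains p = false := by
        rw [PySem.Dict.contains_eq_decide_mem_keys]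
        simp only [decide_eq_false_iff_not, PySem.Dict.keys_mk, List.map_map]
        intro hmem
        have hmem' : p ∈ onceOf ps := by simpa [Function.comp] using hmem
        exact hp (hsub p hmem')
      rw [PySem.Dict.items_insert_of_not_contains _ _ hnc]
      simp

-- B computes onceOf of the flattened list
lemma B_char (c : List (String × List (String × List String))) :
    unique_programs_alt c = onceOf (c.flatMap progsOf) := by
  unfold unique_programs_alt
  have hfold :
      c.foldl
        (fun (st : PySem.Set String × PySem.Dict String Bool) campus =>
          (((PySem.Dict.mk campus.2).get? "programs").getD []).foldl
            (fun st p =>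
              if PySem.Set.contains st.1 p then (st.1, st.2.erase p)
              else (PySem.Set.add st.1 p, st.2.insert p true))
            st)
        (PySem.Set.empty, PySem.Dict.empty)
        = (c.flatMap progsOf).foldl bstep (PySem.Set.empty, PySem.Dict.empty) := by
    rw [List.foldl_flatMap]
    rfl
  rw [hfold, bfold_char]
  simp [PySem.Dict.keys_mk, List.map_map, Function.comp_def]

-- A computes onceOf of the same flattened list, given unique outer keys
lemma A_char (c : List (String × List (String × List String)))
    (h : (c.map Prod.fst).Nodup) :
    unique_programs c = onceOf (c.flatMap progsOf) := by
  unfold unique_programs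
  have hkeys : (PySem.Dict.mk c).keys = c.map Prod.fst := by
    simp [PySem.Dict.keys]
  have hcount :
      (PySem.Dict.mk c).keys.foldl
        (fun (pc : PySem.Dict String Int) i =>
          (((PySem.Dict.mk (((PySem.Dict.mk c).get? i).getD [])).get? "programs").getD []).foldl
            (fun pc p => pc.insert p (pc.getD p 0 + 1)) pc)
        PySem.Dict.empty
        = PySem.Dict.counter (c.flatMap progsOf) := by
    rw [hkeys, List.foldl_map]
    have hcongr :
        c.foldl
          (fun (pc : PySem.Dict String Int) i =>
            (((PySem.Dict.mk (((PySem.Dict.mk c).get? i.1).getD [])).get? "programs").getD []).foldl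
              (fun pc p => pc.insert p (pc.getD p 0 + 1)) pc)
          PySem.Dict.empty
          = c.foldl
              (fun (pc : PySem.Dict String Int) i =>
                (progsOf i).foldl
                  (fun pc p => pc.insert p (pc.getD p 0 + 1)) pc)
              PySem.Dict.empty := by
      apply PySem.List.foldl_congr_mem
      intro pc i hi
      have hget : (PySem.Dict.mk c).get? i.1 = some i.2 :=
        PySem.Dict.get?_of_mem_items (d := PySem.Dict.mk c) (by simpa using hi)
          (by simpa [hkeys] using h)
      rw [hget]
      rfl
    rw [hcongr, ← List.foldl_flatMap]
    exact PySem.Dict.foldl_insert_getD_add_one_eq_counter (c.flatMap progsOf)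
  rw [hcount]
  show (PySem.Dict.counter (c.flatMap progsOf)).keys.foldl
      (fun result p =>
        if (PySem.Dict.counter (c.flatMap progsOf)).getD p 0 == 1 then result ++ [p] else result)
      [] = onceOf (c.flatMap progsOf)
  rw [PySem.List.foldl_append_if_eq_filter
        (fun p => (PySem.Dict.counter (c.flatMap progsOf)).getD p 0 == 1)]
  rw [List.nil_append, PySem.Dict.keys_counter]
  unfold onceOf
  apply List.filter_congr
  intro q hq
  rw [PySem.Dict.getD_counter]
  simp

-- ===== VERDICT (by name: the statement is the Claim_ definition above) =====
theorem unique_programs_spec : Claim_equal_unique_programs := by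
  intro c _ hpre
  unfold Spec_unique_programs
  rw [A_char c hpre.1, B_char c]
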